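-- pv_equiv track=rewrite | github.com/WilfredoAR22/PG2 | backend/scripts/analizar_script.py | analizar_datos_duplicados
-- ===== SOURCE A (Python) =====
-- IGNORAR_COLUMNAS = {"id", "clienteid", "pedidoid", "facturaid", "primary", "foreign"}  # Añade otras columnas comunes que quieras ignorar aquí
--
-- def analizar_datos_duplicados(tablas):
--     advertencias = []
--     processed_pairs = set()  # Para evitar advertencias duplicadas entre las mismas tablas
--     for table1, columns1 in tablas.items():
--         for table2, columns2 in tablas.items():
--             if table1 != table2 and (table2, table1) not in processed_pairs:
--                 processed_pairs.add((table1, table2))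
--                 for col1 in columns1:
--                     if col1 in columns2 and col1.lower() not in IGNORAR_COLUMNAS:
--                         advertencias.append(f"Duplicación de datos: La columna '{col1}' en '{table1}' puede ser redundante y centralizable en '{table2}'.")
--     return advertencias
-- ===== SOURCE B (Python) =====
-- IGNORAR_COLUMNAS = {"id", "clienteid", "pedidoid", "facturaid", "primary", "foreign"}
--
-- def analizar_datos_duplicados(tablas):
--     # stage 1: one pass builds, per table, the non-ignored columns (in order,
--     # duplicates kept) and a membership set of all its columns
--     prepped = [(t, [c for c in cols if c.lower() not in IGNORAR_COLUMNAS], set(cols))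
--                for t, cols in tablas.items()]
--     # stage 2: recursion on the prepped list; head contributes against the rest
--     def go(prepped):
--         if not prepped:
--             return []
--         (t1, keep1, _), rest = prepped[0], prepped[1:]
--         here = [f"Duplicación de datos: La columna '{col}' en '{t1}' puede ser redundante y centralizable en '{t2}'."
--                 for (t2, _, set2) in rest for col in keep1 if col in set2]
--         return here + go(rest)
--     return go(prepped)
-- ===== Notes on version B (the rewrite author's own statement) =====
-- stated objective: alternative
-- what changed: Instead of A's nested double scan over ordered table pairs with a processed_pairs dedup set and two guards, B first builds in one pass a per-table index (non-ignored columns plus a membership set) and then recurses on that list, each head contributing its warnings against the remaining tables via a comprehension, so the dedup set, both guards and the per-pair rescan of ignore checks and list membership disappear.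
import Mathlib
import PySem

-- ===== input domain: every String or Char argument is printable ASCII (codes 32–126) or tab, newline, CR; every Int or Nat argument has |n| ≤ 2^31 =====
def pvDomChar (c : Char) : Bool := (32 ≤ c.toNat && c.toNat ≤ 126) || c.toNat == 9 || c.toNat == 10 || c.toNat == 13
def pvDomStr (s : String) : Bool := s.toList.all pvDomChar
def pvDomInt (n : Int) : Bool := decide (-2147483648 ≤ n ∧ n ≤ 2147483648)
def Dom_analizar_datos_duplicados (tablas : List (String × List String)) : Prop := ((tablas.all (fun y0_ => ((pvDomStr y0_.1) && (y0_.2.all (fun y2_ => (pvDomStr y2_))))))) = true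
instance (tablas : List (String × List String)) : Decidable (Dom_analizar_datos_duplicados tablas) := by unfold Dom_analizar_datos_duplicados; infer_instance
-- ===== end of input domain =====

-- B replaces A's nested double scan with a processed_pairs dedup set and two guards by a
-- one-pass precomputation (per-table non-ignored columns + membership set) followed by a
-- recursion on that list, each head contributing against the rest; objective: alternative.

-- ===== PORT A =====
-- IGNORAR_COLUMNAS (a Python set literal of distinct strings)
def pvIgnorar : PySem.Set String :=
  PySem.Set.ofList ["id", "clienteid", "pedidoid", "facturaid", "primary", "foreign"]

-- the f-string of both programs
def pvMsg (col t1 t2 : String) : String :=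
  "Duplicación de datos: La columna '" ++ col ++ "' en '" ++ t1 ++
  "' puede ser redundante y centralizable en '" ++ t2 ++ "'."

-- body of A's inner `for table2, columns2 in tablas.items():` loop
def pvStepInnerA (p1 : String × List String)
    (st : List String × PySem.Set (String × String)) (p2 : String × List String) :
    List String × PySem.Set (String × String) :=
  if p1.1 != p2.1 && !(PySem.Set.contains st.2 (p2.1, p1.1)) then
    (p1.2.foldl (fun adv col =>
        if p2.2.contains col && !(PySem.Set.contains pvIgnorar (PySem.Str.lower col)) then
          adv ++ [pvMsg col p1.1 p2.1]
        else adv) st.1,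
     PySem.Set.add st.2 (p1.1, p2.1))
  else st

def analizar_datos_duplicados (tablas : List (String × List String)) : List String :=
  (tablas.foldl (fun st p1 => tablas.foldl (pvStepInnerA p1) st)
    (([] : List String), (PySem.Set.empty : PySem.Set (String × String)))).1

-- ===== PORT B =====
-- stage 1 of Source B: prepped = [(t, [c for c in cols if not ignored], set(cols)) …]
def pvPrep (tablas : List (String × List String)) :
    List (String × List String × PySem.Set String) :=
  tablas.map (fun p =>
    (p.1,
     p.2.filter (fun c => !(PySem.Set.contains pvIgnorar (PySem.Str.lower c))),
     PySem.Set.ofList p.2))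

-- stage 2 of Source B: go(prepped) — head contributes against the rest, then recurse;
-- the comprehension [msg for (t2,_,set2) in rest for col in keep1 if col in set2]
def pvGo : List (String × List String × PySem.Set String) → List String
  | [] => []
  | p :: rest =>
    (rest.flatMap (fun q =>
      (p.2.1.filter (fun col => PySem.Set.contains q.2.2 col)).map
        (fun col => pvMsg col p.1 q.1))) ++ pvGo rest

def analizar_datos_duplicados_alt (tablas : List (String × List String)) : List String :=
  pvGo (pvPrep tablas)

-- ===== PRECONDITION & SPEC =====
-- Pre_ requires the table names to be pairwise distinct: the input is a Python dict, whose
-- keys are always distinct, so no dict input is excluded; an association list with a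
-- duplicated key does not determine the dict (dict construction collapses duplicates).
def Pre_analizar_datos_duplicados (tablas : List (String × List String)) : Prop :=
  (tablas.map Prod.fst).Nodup

instance (tablas : List (String × List String)) : Decidable (Pre_analizar_datos_duplicados tablas) := by
  unfold Pre_analizar_datos_duplicados; infer_instance

def pvWitness_analizar_datos_duplicados : (List (String × List String)) :=
  [("clientes", ["nombre", "id"]), ("pedidos", ["nombre", "total"]), ("facturas", ["total"])]

def Spec_analizar_datos_duplicados (tablas : List (String × List String)) (out : List String) : Prop := out = analizar_datos_duplicados_alt tablas
instance (tablas : List (String × List String)) (out : List String) : Decidable (Spec_analizar_datos_duplicados tablas out) := by unfold Spec_analizar_datos_duplicados; infer_instance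

-- ===== CLAIM (what is proved, stated in full; the proofs are below) =====
def Claim_equal_analizar_datos_duplicados : Prop := ∀ (tablas : List (String × List String)), Dom_analizar_datos_duplicados tablas → Pre_analizar_datos_duplicados tablas → Spec_analizar_datos_duplicados tablas (analizar_datos_duplicados tablas)

-- ===== LEMMAS AND PROOFS =====

-- the warnings one ordered pair of tables contributes
def pvWarn (p q : String × List String) : List String :=
  (p.2.filter (fun col =>
      q.2.contains col && !(PySem.Set.contains pvIgnorar (PySem.Str.lower col)))).map
    (fun col => pvMsg col p.1 q.1)

-- the full warning list, pair by pair in unordered-pair order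
def pvBig : List (String × List String) → List String
  | [] => []
  | p :: rest => (rest.map (pvWarn p)).flatten ++ pvBig rest

lemma pvContains_ofList (l : List String) (x : String) :
    PySem.Set.contains (PySem.Set.ofList l) x = l.contains x := by
  by_cases h : x ∈ l
  · simp [h]
  · simp [h]

lemma pvPair_eq (p q : String × List String) :
    ((p.2.filter (fun c => !(PySem.Set.contains pvIgnorar (PySem.Str.lower c)))).filter
        (fun col => PySem.Set.contains (PySem.Set.ofList q.2) col)).map
      (fun col => pvMsg col p.1 q.1) = pvWarn p q := by
  rw [pvWarn, List.filter_filter]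
  apply congrArg
  apply List.filter_congr
  intro c _
  rw [pvContains_ofList]

lemma pvAlt_eq_big (L : List (String × List String)) :
    analizar_datos_duplicados_alt L = pvBig L := by
  rw [analizar_datos_duplicados_alt]
  induction L with
  | nil => rfl
  | cons p rest ih =>
    rw [pvPrep, List.map_cons, pvGo, pvBig, ← pvPrep, ih]
    congr 1
    rw [List.flatMap_def, pvPrep, List.map_map]
    apply congrArg
    apply List.map_congr_left
    intro q _
    exact pvPair_eq p q

lemma pvInner_fold_eq (p q : String × List String) (adv : List String) :
    p.2.foldl (fun adv col =>
      if q.2.contains col && !(PySem.Set.contains pvIgnorar (PySem.Str.lower col)) then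
        adv ++ [pvMsg col p.1 q.1]
      else adv) adv = adv ++ pvWarn p q := by
  simpa [pvWarn] using
    PySem.List.foldl_append_if
      (p := fun col => q.2.contains col && !(PySem.Set.contains pvIgnorar (PySem.Str.lower col)))
      (f := fun col => pvMsg col p.1 q.1) (l := p.2) (acc := adv)

lemma pvContains_add {α : Type} [BEq α] [LawfulBEq α] (s : PySem.Set α) (x y : α) :
    PySem.Set.contains (PySem.Set.add s x) y = (PySem.Set.contains s y || y == x) := by
  by_cases h : y ∈ PySem.Set.add s x
  · have h' := h
    rw [PySem.Set.mem_add] at h'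
    have hc : PySem.Set.contains (PySem.Set.add s x) y = true :=
      (PySem.Set.contains_iff _ _).2 h
    rw [hc]
    rcases h' with h' | h'
    · rw [(PySem.Set.contains_iff s y).2 h']; simp
    · simp [h']
  · have h1 : PySem.Set.contains (PySem.Set.add s x) y = false := by
      rw [Bool.eq_false_iff]; intro hc
      exact h ((PySem.Set.contains_iff _ _).1 hc)
    rw [PySem.Set.mem_add, not_or] at h
    have h2 : PySem.Set.contains s y = false := by
      rw [Bool.eq_false_iff]; intro hc
      exact h.1 ((PySem.Set.contains_iff _ _).1 hc)
    simp [h.2]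

-- whether A's pair guard (t1 != t2 and (t2, t1) not in processed) passes
def pvPass (t1 : String) (proc : PySem.Set (String × String))
    (q : String × List String) : Bool :=
  (t1 != q.1) && !(PySem.Set.contains proc (q.1, t1))

lemma pvPass_add (t1 a : String) (proc : PySem.Set (String × String))
    (q : String × List String) :
    pvPass t1 (PySem.Set.add proc (t1, a)) q = pvPass t1 proc q := by
  by_cases h : t1 = q.1
  · simp [pvPass, h]
  · have hne : ¬ ((q.1, t1) = (t1, a)) := by
      intro hc; exact h (congrArg Prod.fst hc).symm
    simp [pvPass, hne]

lemma pvInnerA_eq (t1 : String) (c1 : List String)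
    (M : List (String × List String)) (adv : List String)
    (proc : PySem.Set (String × String)) :
    M.foldl (pvStepInnerA (t1, c1)) (adv, proc) =
      (adv ++ ((M.filter (pvPass t1 proc)).map (pvWarn (t1, c1))).flatten,
       (M.filter (pvPass t1 proc)).foldl
         (fun pr q => PySem.Set.add pr (t1, q.1)) proc) := by
  induction M generalizing adv proc with
  | nil => simp
  | cons q M ih =>
    by_cases h : pvPass t1 proc q = true
    · have hstep : pvStepInnerA (t1, c1) (adv, proc) q =
          (adv ++ pvWarn (t1, c1) q, PySem.Set.add proc (t1, q.1)) := by
        rw [pvStepInnerA]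
        simp only [pvPass] at h
        rw [if_pos h]
        exact congrArg (fun z => (z, PySem.Set.add proc (t1, q.1)))
          (pvInner_fold_eq (t1, c1) q adv)
      have hfil : M.filter (pvPass t1 (PySem.Set.add proc (t1, q.1))) =
          M.filter (pvPass t1 proc) := by
        apply List.filter_congr; intro q' _; exact pvPass_add t1 q.1 proc q'
      rw [List.foldl_cons, hstep, ih, hfil, List.filter_cons_of_pos h]
      simp
    · have hstep : pvStepInnerA (t1, c1) (adv, proc) q = (adv, proc) := by
        rw [pvStepInnerA]
        simp only [pvPass] at h
        rw [if_neg h]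
      rw [List.foldl_cons, hstep, ih, List.filter_cons_of_neg (by simpa using h)]

lemma pvContains_foldl_add (t1 : String) (xs : List (String × List String))
    (proc : PySem.Set (String × String)) (y : String × String) :
    PySem.Set.contains (xs.foldl (fun pr q => PySem.Set.add pr (t1, q.1)) proc) y =
      (PySem.Set.contains proc y || xs.any (fun q => y == (t1, q.1))) := by
  induction xs generalizing proc with
  | nil => simp
  | cons q xs ih =>
    rw [List.foldl_cons, ih, pvContains_add]
    simp [Bool.or_assoc]

lemma pvOuter_eq (L : List (String × List String))
    (hnd : (L.map Prod.fst).Nodup) :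
    ∀ (S P : List (String × List String)), L = P ++ S →
    ∀ (adv : List String) (proc : PySem.Set (String × String)),
    (∀ t1 t2 : String, t1 ∈ S.map Prod.fst → t2 ≠ t1 →
      (PySem.Set.contains proc (t2, t1) = true ↔ t2 ∈ P.map Prod.fst)) →
    (S.foldl (fun st p1 => L.foldl (pvStepInnerA p1) st) (adv, proc)).1 = adv ++ pvBig S := by
  intro S
  induction S with
  | nil => intro P _ adv proc _; simp [pvBig]
  | cons p S' ih =>
    intro P hL adv proc hmem
    obtain ⟨t1, c1⟩ := p
    have ht1S : t1 ∈ ((t1, c1) :: S').map Prod.fst := by simp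
    -- key facts from Nodup on L = P ++ (t1,c1) :: S'
    have hnd' : ((P.map Prod.fst) ++ t1 :: S'.map Prod.fst).Nodup := by
      simpa [hL] using hnd
    have hdisj := (List.nodup_append.1 hnd').2.2
    have ht1P : t1 ∉ P.map Prod.fst := by
      intro hc; exact hdisj t1 hc t1 (by simp) rfl
    have ht1S' : t1 ∉ S'.map Prod.fst := by
      have := (List.nodup_append.1 hnd').2.1
      exact (List.nodup_cons.1 this).1
    have hS'P : ∀ b, b ∈ S'.map Prod.fst → b ∉ P.map Prod.fst := by
      intro b hb hc
      exact hdisj b hc b (by simp [hb]) rfl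
    -- the guard selects exactly S'
    have hfil : L.filter (pvPass t1 proc) = S' := by
      rw [hL, List.filter_append, List.filter_cons]
      have h1 : P.filter (pvPass t1 proc) = [] := by
        rw [List.filter_eq_nil_iff]
        intro q hq
        have hq1 : q.1 ∈ P.map Prod.fst := List.mem_map_of_mem hq
        have hne : t1 ≠ q.1 := by intro hc; exact ht1P (hc ▸ hq1)
        have hmemq : (q.1, t1) ∈ proc :=
          (PySem.Set.contains_iff _ _).1 ((hmem t1 q.1 ht1S (Ne.symm hne)).2 hq1)
        simp [pvPass, hmemq]
      have h2 : (pvPass t1 proc (t1, c1)) = false := by simp [pvPass]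
      have h3 : S'.filter (pvPass t1 proc) = S' := by
        rw [List.filter_eq_self]
        intro q hq
        have hq1 : q.1 ∈ S'.map Prod.fst := List.mem_map_of_mem hq
        have hne : t1 ≠ q.1 := by intro hc; exact ht1S' (hc ▸ hq1)
        have hnc : (q.1, t1) ∉ proc := by
          intro hc
          exact hS'P q.1 hq1
            ((hmem t1 q.1 ht1S (Ne.symm hne)).1 ((PySem.Set.contains_iff _ _).2 hc))
        simp [pvPass, hne, hnc]
      rw [h1, h2, h3]; simp
    rw [List.foldl_cons, pvInnerA_eq, hfil]
    -- apply the induction hypothesis with P' = P ++ [(t1,c1)]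
    rw [ih (P ++ [(t1, c1)]) (by simp [hL]) _ _ ?_]
    · simp [pvBig]
    · intro t1' t2 ht1' hne
      rw [pvContains_foldl_add]
      constructor
      · intro hor
        rcases Bool.or_eq_true_iff.1 hor with h | h
        · have := (hmem t1' t2 (by simp [ht1']) hne).1 h
          simp [this]
        · rw [List.any_eq_true] at h
          obtain ⟨q, _, hq⟩ := h
          have : t2 = t1 := by
            have := (Prod.mk.injEq .. ▸ (beq_iff_eq.1 hq))
            exact this.1
          simp [this]
      · intro hm
        simp only [List.map_append, List.mem_append] at hm
        rcases hm with h | h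
        · exact Bool.or_eq_true_iff.2 (Or.inl ((hmem t1' t2 (by simp [ht1']) hne).2 h))
        · have ht2 : t2 = t1 := by simpa using h
          refine Bool.or_eq_true_iff.2 (Or.inr ?_)
          rw [List.any_eq_true]
          obtain ⟨q, hq, hq1⟩ := List.mem_map.1 ht1'
          exact ⟨q, hq, by simp [ht2, hq1]⟩

-- ===== VERDICT (by name: the statement is the Claim_ definition above) =====
theorem analizar_datos_duplicados_spec : Claim_equal_analizar_datos_duplicados := by
  intro tablas _ hpre
  unfold Spec_analizar_datos_duplicados
  rw [pvAlt_eq_big, analizar_datos_duplicados]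
  have := pvOuter_eq tablas hpre tablas [] rfl [] PySem.Set.empty ?_
  · simpa using this
  · intro t1 t2 _ _
    constructor
    · intro h; exact absurd ((PySem.Set.contains_iff _ _).1 h) (by simp [PySem.Set.empty])
    · intro h; simp at h
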